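-- pv_equiv track=rewrite | github.com/pypi-data/pypi-mirror-82 | packages/bleak-sigspec/bleak_sigspec-0.0.4-py3-none-any.whl/bleak_sigspec/utils.py | _get_plain_ref_fields
-- ===== SOURCE A (Python) =====
-- def _get_plain_ref_fields(fof_refchar):
--     it_dict = fof_refchar.copy()
--     for ref in it_dict:
--         if any([sf in it_dict for sf in it_dict[ref]]):
--             for sf in it_dict[ref]:
--                 if sf in it_dict:
--                     index = fof_refchar[ref].index(sf)
--                     fof_refchar[ref].pop(index)
--                     for rf in it_dict[sf]:
--                         fof_refchar[ref].insert(index, rf)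
--                         index += 1
--             fof_refchar = _get_plain_ref_fields(fof_refchar)
--         else:
--             break
--         break
--
--     return fof_refchar
-- ===== SOURCE B (Python) =====
-- def _get_plain_ref_fields(fof_refchar):
--     # Mutates fof_refchar[first key] in place and returns fof_refchar, like A.
--     if not fof_refchar:
--         return fof_refchar
--     ref = next(iter(fof_refchar))
--
--     def expand(sf):
--         if sf in fof_refchar:
--             out = []
--             for x in fof_refchar[sf]:
--                 out.extend(expand(x))
--             return out
--         return [sf]
--
--     if any(sf in fof_refchar for sf in fof_refchar[ref]):
--         new = []
--         for sf in fof_refchar[ref]: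
--             new.extend(expand(sf))
--         fof_refchar[ref][:] = new
--     return fof_refchar
-- ===== Notes on version B (the rewrite author's own statement) =====
-- stated objective: simpler
-- what changed: Replaces A's repeated mutate-the-live-list substitution passes plus restart-recursion with a single direct recursive expansion of the first key's reference list (each entry expanded via a recursive helper), written into the dict once.
-- outside the precondition, e.g. on _get_plain_ref_fields({'a': ['a']}): A returns {'a': []}, B raises RecursionError; on _get_plain_ref_fields({'a': ['b'], 'b': ['a']}): A returns {'a': [], 'b': ['a']}, B raises RecursionError
import Mathlib
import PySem

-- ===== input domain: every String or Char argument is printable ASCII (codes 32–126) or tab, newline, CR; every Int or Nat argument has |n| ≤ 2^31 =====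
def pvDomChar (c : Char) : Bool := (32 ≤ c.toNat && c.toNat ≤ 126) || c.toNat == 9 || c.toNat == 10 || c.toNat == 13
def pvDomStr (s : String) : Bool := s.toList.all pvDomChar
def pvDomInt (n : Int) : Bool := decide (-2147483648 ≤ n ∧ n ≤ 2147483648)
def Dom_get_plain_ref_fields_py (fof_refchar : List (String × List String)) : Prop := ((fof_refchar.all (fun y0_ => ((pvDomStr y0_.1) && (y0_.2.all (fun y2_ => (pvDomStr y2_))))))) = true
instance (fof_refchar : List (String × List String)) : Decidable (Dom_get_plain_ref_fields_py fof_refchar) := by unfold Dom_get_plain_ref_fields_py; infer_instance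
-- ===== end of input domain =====

-- B replaces A's repeated in-place substitution-and-restart passes by one direct recursive
-- expansion of the first key's reference list (objective: simpler).  Both A and B mutate the
-- first key's list of the argument in place in Python; the equivalence proved here is about
-- the returned value.

-- ===== PORT A =====
-- A's recursion (and its inner pass over the live list) is unbounded in Python; the port runs
-- it on a fuel that provably suffices on Pre_ inputs: bigFuel = (total size of the full
-- expansion of the first key's list) + 1, computed by the fuel-bounded supOpt below.
def supOpt (d : PySem.Dict String (List String)) : Nat → String → Option (List String)
  | 0, e => if d.contains e then none else some [e]
  | m+1, e => if d.contains e then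
      ((d.getD e []).foldr (fun x acc =>
        match supOpt d m x, acc with
        | some s, some r => some (s ++ r)
        | _, _ => none) (some [])).map (fun r => e :: r)
    else some [e]

def bigFuel (d : PySem.Dict String (List String)) : Nat :=
  match d.keys.head? with
  | none => 1
  | some ref => ((d.getD ref []).map (fun e => ((supOpt d (d.size + 1) e).map List.length).getD 1)).sum + 1

-- one substitution pass: 'for sf in it_dict[ref]' over the live list, by index
def passLoop (ref : String) : Nat → PySem.Dict String (List String) → Nat → PySem.Dict String (List String)
  | 0, d, _ => d
  | fuel+1, d, i =>
    let lst := d.getD ref []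
    if i < lst.length then
      let sf := lst.getD i ""
      let d' :=
        if d.contains sf then
          let idx := (PySem.List.index? lst sf).getD 0
          -- pop at idx then insert the elements of it_dict[sf] there, one by one = splice;
          -- exact for sf ≠ ref (always the case on Pre_ inputs; for sf = ref Python diverges)
          let sub := d.getD sf []
          d.insert ref (lst.take idx ++ sub ++ lst.drop (idx + 1))
        else d
      passLoop ref fuel d' (i + 1)
    else d

def aLoop (innerF : Nat) : Nat → PySem.Dict String (List String) → PySem.Dict String (List String)
  | 0, d => d
  | fuel+1, d =>
    match d.keys.head? with
    | none => d                       -- empty dict: the for-loop body never runs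
    | some ref =>
      let cur := d.getD ref []
      if cur.any (fun sf => d.contains sf) then
        aLoop innerF fuel (passLoop ref innerF d 0)   -- then 'fof_refchar = _get_plain_ref_fields(fof_refchar)' (tail recursion)
      else d

def get_plain_ref_fields_py (fof_refchar : List (String × List String)) : List (String × List String) :=
  let d := PySem.Dict.mk fof_refchar
  (aLoop (bigFuel d) (bigFuel d) d).items

-- ===== PORT B =====
-- transliteration of Source B: one recursive expansion of the first key's list
def expandF (d : PySem.Dict String (List String)) : Nat → String → List String
  | 0, sf => [sf]        -- fuel guard only; never reached on Pre_ inputs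
  | m+1, sf => if d.contains sf then (d.getD sf []).flatMap (expandF d m) else [sf]

def get_plain_ref_fields_py_alt (fof_refchar : List (String × List String)) : List (String × List String) :=
  let d := PySem.Dict.mk fof_refchar
  match d.keys.head? with
  | none => fof_refchar
  | some ref =>
    let cur := d.getD ref []
    if cur.any (fun sf => d.contains sf) then
      (d.insert ref (cur.flatMap (expandF d (fof_refchar.length + 1)))).items
    else fof_refchar

-- ===== PRECONDITION & SPEC =====
def refSuccs (f : List (String × List String)) (k : String) : List String :=
  ((PySem.Dict.mk f).getD k []).filter (fun s => (PySem.Dict.mk f).contains s)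

def reachN (f : List (String × List String)) : Nat → List String → List String
  | 0, S => S
  | m+1, S => (reachN f m S ++ (reachN f m S).flatMap (refSuccs f)).dedup

def startKeys (f : List (String × List String)) : List String :=
  match f with
  | [] => []
  | (_, cur) :: _ => cur.filter (fun s => (PySem.Dict.mk f).contains s)

-- Pre_ excludes association lists with duplicate keys (they do not represent a Python dict)
-- and inputs whose reference graph has a cycle reachable from the first key's list: on those
-- A either exceeds Python's recursion limit or returns an accidental value produced by
-- mutating the list it is iterating over, and B raises RecursionError.
def Pre_get_plain_ref_fields_py (fof_refchar : List (String × List String)) : Prop :=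
  (fof_refchar.map Prod.fst).Nodup ∧
  ∀ k ∈ reachN fof_refchar (fof_refchar.length + 2) (startKeys fof_refchar),
    k ∉ reachN fof_refchar (fof_refchar.length + 2) (refSuccs fof_refchar k)

instance (fof_refchar : List (String × List String)) : Decidable (Pre_get_plain_ref_fields_py fof_refchar) := by
  unfold Pre_get_plain_ref_fields_py; infer_instance

def pvWitness_get_plain_ref_fields_py : (List (String × List String)) :=
  [("a", ["b", "x"]), ("b", ["y"])]

def Spec_get_plain_ref_fields_py (fof_refchar : List (String × List String)) (out : List (String × List String)) : Prop :=
  out = get_plain_ref_fields_py_alt fof_refchar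

instance (fof_refchar : List (String × List String)) (out : List (String × List String)) : Decidable (Spec_get_plain_ref_fields_py fof_refchar out) := by
  unfold Spec_get_plain_ref_fields_py; infer_instance

-- ===== CLAIM (what is proved, stated in full; the proofs are below) =====
def Claim_equal_get_plain_ref_fields_py : Prop := ∀ (fof_refchar : List (String × List String)), Dom_get_plain_ref_fields_py fof_refchar → Pre_get_plain_ref_fields_py fof_refchar → Spec_get_plain_ref_fields_py fof_refchar (get_plain_ref_fields_py fof_refchar)

-- ===== LEMMAS AND PROOFS =====

-- ghost notions (proof-only): full expansion support, plain expansion, weight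
def GoodE (d : PySem.Dict String (List String)) (ref : String) (N : Nat) (e : String) : Prop :=
  ∃ s, supOpt d N e = some s ∧ ref ∉ s
def GoodL (d : PySem.Dict String (List String)) (ref : String) (N : Nat) (l : List String) : Prop :=
  ∀ e ∈ l, GoodE d ref N e
def exF (d : PySem.Dict String (List String)) (N : Nat) (e : String) : List String :=
  ((supOpt d N e).getD [e]).filter (fun x => !d.contains x)
def EE (d : PySem.Dict String (List String)) (N : Nat) (l : List String) : List String :=
  l.flatMap (exF d N)
def wtF (d : PySem.Dict String (List String)) (N : Nat) (e : String) : Nat :=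
  ((supOpt d N e).map List.length).getD 1
def WtL (d : PySem.Dict String (List String)) (N : Nat) (l : List String) : Nat :=
  (l.map (wtF d N)).sum

def RChain (f : List (String × List String)) : List String → Prop
  | [] => True
  | [a] => (PySem.Dict.mk f).contains a = true
  | a :: b :: t => (PySem.Dict.mk f).contains a = true ∧ b ∈ refSuccs f a ∧ RChain f (b :: t)

def supListF (d : PySem.Dict String (List String)) (m : Nat) (l : List String) : Option (List String) :=
  l.foldr (fun x acc =>
    match supOpt d m x, acc with
    | some s, some r => some (s ++ r)
    | _, _ => none) (some [])

theorem supOpt_succ (d : PySem.Dict String (List String)) (m : Nat) (e : String) :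
    supOpt d (m+1) e = if d.contains e then (supListF d m (d.getD e [])).map (fun r => e :: r) else some [e] := rfl

theorem supListF_nil (d : PySem.Dict String (List String)) (m : Nat) : supListF d m [] = some [] := rfl

theorem supListF_cons (d : PySem.Dict String (List String)) (m : Nat) (x : String) (t : List String) :
    supListF d m (x :: t) = match supOpt d m x, supListF d m t with
      | some s, some r => some (s ++ r)
      | _, _ => none := rfl

theorem sup_mono_all (d : PySem.Dict String (List String)) (m : Nat) :
    (∀ e s, supOpt d m e = some s → supOpt d (m+1) e = some s) ∧
    (∀ l s, supListF d m l = some s → supListF d (m+1) l = some s) := by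
  induction m with
  | zero =>
    constructor
    · intro e s hs
      simp only [supOpt] at hs ⊢
      by_cases h : d.contains e
      · simp [h] at hs
      · simp only [Bool.not_eq_true] at h
        simp [h] at hs ⊢
        exact hs
    · intro l s hs
      induction l generalizing s with
      | nil => exact hs
      | cons x t ih =>
        rw [supListF_cons] at hs ⊢
        by_cases h : d.contains x
        · simp [supOpt, h] at hs
        · simp only [Bool.not_eq_true] at h
          rw [supOpt_succ]
          simp only [supOpt, h] at hs ⊢
          simp only [Bool.false_eq_true, if_false] at hs ⊢
          cases ht : supListF d 0 t with
          | none => rw [ht] at hs; simp at hs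
          | some r => rw [ht] at hs; rw [ih r ht]; exact hs
  | succ m ihm =>
    have P : ∀ e s, supOpt d (m+1) e = some s → supOpt d (m+2) e = some s := by
      intro e s hs
      rw [supOpt_succ] at hs
      rw [supOpt_succ]
      by_cases h : d.contains e
      · simp only [h, if_true] at hs ⊢
        cases ht : supListF d m (d.getD e []) with
        | none => rw [ht] at hs; simp at hs
        | some r => rw [ht] at hs; rw [ihm.2 _ r ht]; exact hs
      · simp only [h] at hs ⊢; exact hs
    refine ⟨P, ?_⟩
    intro l s hs
    induction l generalizing s with
    | nil => exact hs
    | cons x t ih =>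
      rw [supListF_cons] at hs ⊢
      cases hx : supOpt d (m+1) x with
      | none => rw [hx] at hs; simp at hs
      | some sx =>
        rw [hx] at hs
        cases ht : supListF d (m+1) t with
        | none => rw [ht] at hs; simp at hs
        | some r =>
          rw [ht] at hs
          rw [P _ _ hx, ih r ht]
          exact hs


theorem supOpt_mono_le (d : PySem.Dict String (List String)) {m m' : Nat} (h : m ≤ m') {e : String} {s : List String}
    (hs : supOpt d m e = some s) : supOpt d m' e = some s := by
  induction h with
  | refl => exact hs
  | step h ih => exact (sup_mono_all d _).1 _ _ ih


theorem supOpt_nonkey (d : PySem.Dict String (List String)) (m : Nat) {e : String} (h : d.contains e = false) :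
    supOpt d m e = some [e] := by
  cases m with
  | zero => simp [supOpt, h]
  | succ m => simp [supOpt_succ, h]


theorem supOpt_none_key (d : PySem.Dict String (List String)) {m : Nat} {e : String} (h : supOpt d m e = none) :
    d.contains e = true := by
  by_contra hk
  simp only [Bool.not_eq_true] at hk
  rw [supOpt_nonkey d m hk] at h
  simp at h


theorem mem_self_of_supOpt (d : PySem.Dict String (List String)) {m : Nat} {e : String} {s : List String}
    (h : supOpt d m e = some s) : e ∈ s := by
  cases m with
  | zero =>
    simp only [supOpt] at h
    by_cases hk : d.contains e
    · simp [hk] at h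
    · simp only [Bool.not_eq_true] at hk; simp [hk] at h; simp [← h]
  | succ m =>
    rw [supOpt_succ] at h
    by_cases hk : d.contains e
    · simp only [hk, if_true] at h
      cases ht : supListF d m (d.getD e []) with
      | none => rw [ht] at h; simp at h
      | some r => rw [ht] at h; simp only [Option.map_some] at h
                  cases h; simp
    · simp only [hk] at h
      simp only [Bool.false_eq_true, if_false, Option.some.injEq] at h
      simp [← h]


theorem supListF_none (d : PySem.Dict String (List String)) {m : Nat} {l : List String}
    (h : supListF d m l = none) : ∃ x ∈ l, supOpt d m x = none := by
  induction l with
  | nil => rw [supListF_nil] at h; simp at h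
  | cons x t ih =>
    rw [supListF_cons] at h
    cases hx : supOpt d m x with
    | none => exact ⟨x, List.mem_cons_self, hx⟩
    | some sx =>
      rw [hx] at h
      cases ht : supListF d m t with
      | none => obtain ⟨y, hy, hyn⟩ := ih ht; exact ⟨y, List.mem_cons_of_mem _ hy, hyn⟩
      | some r => rw [ht] at h; simp at h


theorem supListF_mem (d : PySem.Dict String (List String)) {m : Nat} {l r : List String}
    (h : supListF d m l = some r) {x : String} (hx : x ∈ l) :
    ∃ sx, supOpt d m x = some sx ∧ ∀ y ∈ sx, y ∈ r := by
  induction l generalizing r with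
  | nil => simp at hx
  | cons z t ih =>
    rw [supListF_cons] at h
    cases hz : supOpt d m z with
    | none => rw [hz] at h; simp at h
    | some sz =>
      rw [hz] at h
      cases ht : supListF d m t with
      | none => rw [ht] at h; simp at h
      | some rt =>
        rw [ht] at h
        simp only [Option.some.injEq] at h
        subst h
        rcases List.mem_cons.mp hx with rfl | hx'
        · exact ⟨sz, hz, fun y hy => List.mem_append_left _ hy⟩
        · obtain ⟨sx, hsx, hsub⟩ := ih ht hx'
          exact ⟨sx, hsx, fun y hy => List.mem_append_right _ (hsub y hy)⟩


theorem key_sup (d : PySem.Dict String (List String)) {M : Nat} {e : String} {s : List String}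
    (hk : d.contains e = true) (h : supOpt d (M+1) e = some s) :
    ∃ r, supListF d M (d.getD e []) = some r ∧ s = e :: r := by
  rw [supOpt_succ, hk] at h
  simp only [if_true] at h
  cases ht : supListF d M (d.getD e []) with
  | none => rw [ht] at h; simp at h
  | some r =>
    rw [ht] at h
    simp only [Option.map_some, Option.some.injEq] at h
    exact ⟨r, rfl, h.symm⟩


theorem supListF_filter (d : PySem.Dict String (List String)) {m : Nat} :
    ∀ {l r : List String}, supListF d m l = some r → ∀ p : String → Bool,
      r.filter p = l.flatMap (fun x => ((supOpt d m x).getD [x]).filter p) := by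
  intro l
  induction l with
  | nil => intro r h p; rw [supListF_nil] at h; cases h; rfl
  | cons x t ih =>
    intro r h p
    rw [supListF_cons] at h
    cases hx : supOpt d m x with
    | none => rw [hx] at h; simp at h
    | some sx =>
      rw [hx] at h
      cases ht : supListF d m t with
      | none => rw [ht] at h; simp at h
      | some rt =>
        rw [ht] at h
        simp only [Option.some.injEq] at h
        subst h
        rw [List.filter_append, List.flatMap_cons, ih ht p, hx]
        rfl

theorem supListF_length (d : PySem.Dict String (List String)) {m : Nat} :
    ∀ {l r : List String}, supListF d m l = some r →
      r.length = (l.map (fun x => ((supOpt d m x).map List.length).getD 1)).sum := by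
  intro l
  induction l with
  | nil => intro r h; rw [supListF_nil] at h; cases h; rfl
  | cons x t ih =>
    intro r h
    rw [supListF_cons] at h
    cases hx : supOpt d m x with
    | none => rw [hx] at h; simp at h
    | some sx =>
      rw [hx] at h
      cases ht : supListF d m t with
      | none => rw [ht] at h; simp at h
      | some rt =>
        rw [ht] at h
        simp only [Option.some.injEq] at h
        subst h
        simp only [List.length_append, List.map_cons, List.sum_cons, hx, Option.map_some,
          Option.getD_some, ih ht]

-- plain expansion of a key = concatenation of the expansions of its definition
theorem exF_key (d : PySem.Dict String (List String)) {M : Nat} {e : String} {s : List String}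
    (hk : d.contains e = true) (h : supOpt d (M+1) e = some s) :
    exF d (M+1) e = (d.getD e []).flatMap (exF d (M+1)) := by
  obtain ⟨r, hl, rfl⟩ := key_sup d hk h
  simp only [exF, h, Option.getD_some, List.filter_cons, hk, Bool.not_true, Bool.false_eq_true,
    if_false]
  rw [supListF_filter d hl]
  refine List.flatMap_congr ?_
  intro x hx
  obtain ⟨sx, hsx, -⟩ := supListF_mem d hl hx
  rw [hsx]
  simp only [exF, supOpt_mono_le d (Nat.le_succ M) hsx]


theorem exF_nonkey (d : PySem.Dict String (List String)) (N : Nat) {e : String} (h : d.contains e = false) :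
    exF d N e = [e] := by
  simp [exF, supOpt_nonkey d N h, h]


theorem wt_key (d : PySem.Dict String (List String)) {M : Nat} {e : String} {s : List String}
    (hk : d.contains e = true) (h : supOpt d (M+1) e = some s) :
    wtF d (M+1) e = ((d.getD e []).map (wtF d (M+1))).sum + 1 := by
  obtain ⟨r, hl, rfl⟩ := key_sup d hk h
  simp only [wtF, h, Option.map_some, Option.getD_some, List.length_cons]
  rw [supListF_length d hl]
  congr 1
  apply congrArg List.sum
  refine List.map_congr_left ?_
  intro x hx
  obtain ⟨sx, hsx, -⟩ := supListF_mem d hl hx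
  rw [hsx]
  simp only [wtF, supOpt_mono_le d (Nat.le_succ M) hsx]


theorem wt_pos (d : PySem.Dict String (List String)) {N : Nat} {e : String} {s : List String}
    (h : supOpt d N e = some s) : 1 ≤ wtF d N e := by
  have := mem_self_of_supOpt d h
  simp only [wtF, h, Option.map_some, Option.getD_some]
  cases s with
  | nil => simp at this
  | cons a t => simp


theorem len_le_WtL (d : PySem.Dict String (List String)) {ref : String} {N : Nat} {l : List String}
    (h : GoodL d ref N l) : l.length ≤ WtL d N l := by
  induction l with
  | nil => simp [WtL]
  | cons x t ih =>
    have hx := h x List.mem_cons_self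
    obtain ⟨s, hs, -⟩ := hx
    have h1 := wt_pos d hs
    have h2 := ih (fun e he => h e (List.mem_cons_of_mem _ he))
    simp only [WtL, List.map_cons, List.sum_cons, List.length_cons] at *
    omega


theorem goodE_children (d : PySem.Dict String (List String)) {ref : String} {M : Nat} {e : String}
    (hk : d.contains e = true) (h : GoodE d ref (M+1) e) :
    ∀ x ∈ d.getD e [], GoodE d ref (M+1) x := by
  intro x hx
  obtain ⟨s, hs, hr⟩ := h
  obtain ⟨r, hl, rfl⟩ := key_sup d hk hs
  obtain ⟨sx, hsx, hsub⟩ := supListF_mem d hl hx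
  refine ⟨sx, supOpt_mono_le d (Nat.le_succ M) hsx, fun hm => ?_⟩
  exact hr (List.mem_cons_of_mem _ (hsub _ hm))


theorem goodE_ne_ref (d : PySem.Dict String (List String)) {ref : String} {N : Nat} {e : String}
    (h : GoodE d ref N e) : e ≠ ref := by
  obtain ⟨s, hs, hr⟩ := h
  intro he
  exact hr (he ▸ mem_self_of_supOpt d hs)


theorem containsD (d : PySem.Dict String (List String)) {ref : String} (hc : d.contains ref = true)
    (l : List String) (x : String) : (d.insert ref l).contains x = d.contains x := by
  rw [PySem.Dict.contains_insert]
  by_cases h : x = ref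
  · subst h; simp [hc]
  · simp [h]


theorem getD_insD_self (d : PySem.Dict String (List String)) (ref : String) (l : List String) :
    (d.insert ref l).getD ref [] = l := by
  simp [PySem.Dict.getD_insert d ref ref l []]


theorem getD_insD_ne (d : PySem.Dict String (List String)) {ref x : String} (h : x ≠ ref) (l : List String) :
    (d.insert ref l).getD x [] = d.getD x [] := by
  simp [PySem.Dict.getD_insert, h]


theorem head_keys_insD (d : PySem.Dict String (List String)) {ref : String} (hc : d.contains ref = true)
    (l : List String) : (d.insert ref l).keys = d.keys := by
  exact PySem.Dict.keys_insert_of_contains d l hc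


theorem insert_first_self (ref : String) (cur : List String) (t : List (String × List String))
    (hnd : (((ref, cur) :: t).map Prod.fst).Nodup) :
    (PySem.Dict.mk ((ref, cur) :: t)).insert ref cur = PySem.Dict.mk ((ref, cur) :: t) := by
  apply PySem.Dict.ext
  have hc : (PySem.Dict.mk ((ref, cur) :: t)).contains ref = true := by
    rw [PySem.Dict.contains_eq_isSome_get?, PySem.Dict.get?_mk_cons]; simp
  rw [PySem.Dict.items_insert_of_contains _ _ hc]
  show List.map _ ((ref, cur) :: t) = (ref, cur) :: t
  simp only [List.map_cons, BEq.rfl, if_true]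
  congr 1
  have hnr : ∀ p ∈ t, p.1 ≠ ref := by
    intro p hp
    simp only [List.map_cons, List.nodup_cons] at hnd
    intro hpe
    exact hnd.1 (hpe ▸ List.mem_map_of_mem hp)
  calc List.map (fun p => if (p.1 == ref) = true then (ref, cur) else p) t
      = List.map id t := List.map_congr_left (by
        intro p hp
        simp [hnr p hp])
    _ = t := List.map_id t


theorem any_congr' {l : List String} {p q : String → Bool} (h : ∀ x ∈ l, p x = q x) :
    l.any p = l.any q := by
  induction l with
  | nil => rfl
  | cons x t ih =>
    simp only [List.any_cons]
    rw [h x List.mem_cons_self, ih (fun y hy => h y (List.mem_cons_of_mem _ hy))]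


-- the substitution pass
theorem pass_good (d0 : PySem.Dict String (List String)) (ref : String) (M : Nat)
    (hc : d0.contains ref = true) :
    ∀ fuel lst i, GoodL d0 ref (M+1) lst → WtL d0 (M+1) lst + 1 ≤ fuel + i →
    ∃ out, passLoop ref fuel (d0.insert ref lst) i = d0.insert ref out ∧
      GoodL d0 ref (M+1) out ∧ EE d0 (M+1) out = EE d0 (M+1) lst ∧
      WtL d0 (M+1) out ≤ WtL d0 (M+1) lst ∧
      ((∃ j, i ≤ j ∧ j < lst.length ∧ d0.contains (lst.getD j "") = true) →
        WtL d0 (M+1) out < WtL d0 (M+1) lst) := by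
  intro fuel
  induction fuel with
  | zero =>
    intro lst i hG hF
    refine ⟨lst, rfl, hG, rfl, le_refl _, ?_⟩
    rintro ⟨j, hij, hjl, -⟩
    have := len_le_WtL d0 hG
    omega
  | succ fuel ih =>
    intro lst i hG hF
    simp only [passLoop]
    rw [getD_insD_self]
    by_cases hil : i < lst.length
    · simp only [hil, if_true]
      have hgetd : lst.getD i "" = lst[i] := by
        simp [List.getD_eq_getElem?_getD, List.getElem?_eq_getElem hil]
      have hsfmem : lst.getD i "" ∈ lst := by rw [hgetd]; exact List.getElem_mem hil
      rw [containsD d0 hc]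
      by_cases hksf : d0.contains (lst.getD i "") = true
      · simp only [hksf, if_true]
        -- the substitution step
        have hGsf := hG _ hsfmem
        have hne : lst.getD i "" ≠ ref := goodE_ne_ref d0 hGsf
        have hidx0 : (PySem.List.index? lst (lst.getD i "")).isSome := by
          rw [PySem.List.index?_isSome_iff]; exact hsfmem
        obtain ⟨idx, hidx⟩ := Option.isSome_iff_exists.mp hidx0
        obtain ⟨hidxl, hidxv, -⟩ := PySem.List.getElem_of_index?_eq_some hidx
        rw [hidx]
        rw [getD_insD_ne d0 hne, PySem.Dict.insert_insert_self]
        simp only [Option.getD_some]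
        set sf := lst.getD i "" with hsf
        set lst' := lst.take idx ++ d0.getD sf [] ++ lst.drop (idx + 1) with hlst'
        have hdec : lst = lst.take idx ++ sf :: lst.drop (idx + 1) := by
          conv_lhs => rw [← List.take_append_drop idx lst]
          rw [List.drop_eq_getElem_cons hidxl, hidxv]
        obtain ⟨ssf, hssf, hrssf⟩ := hGsf
        -- invariants for the spliced list
        have hGch : ∀ x ∈ d0.getD sf [], GoodE d0 ref (M+1) x := goodE_children d0 hksf ⟨ssf, hssf, hrssf⟩
        have hG' : GoodL d0 ref (M+1) lst' := by
          intro x hx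
          rw [hlst'] at hx
          rcases List.mem_append.mp hx with hx1 | hx2
          · rcases List.mem_append.mp hx1 with hxa | hxb
            · exact hG x (by rw [hdec]; exact List.mem_append_left _ hxa)
            · exact hGch x hxb
          · exact hG x (by rw [hdec]; exact List.mem_append_right _ (List.mem_cons_of_mem _ hx2))
        have hEsf : exF d0 (M+1) sf = (d0.getD sf []).flatMap (exF d0 (M+1)) :=
          exF_key d0 hksf hssf
        have hE' : EE d0 (M+1) lst' = EE d0 (M+1) lst := by
          conv_rhs => rw [hdec]
          rw [hlst']
          simp only [EE, List.flatMap_append, List.flatMap_cons]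
          rw [hEsf]
          simp [List.append_assoc]
        have hwsf : wtF d0 (M+1) sf = ((d0.getD sf []).map (wtF d0 (M+1))).sum + 1 :=
          wt_key d0 hksf hssf
        have hW' : WtL d0 (M+1) lst = WtL d0 (M+1) lst' + 1 := by
          conv_lhs => rw [hdec]
          rw [hlst']
          simp only [WtL, List.map_append, List.sum_append, List.map_cons, List.sum_cons]
          rw [hwsf]
          omega
        obtain ⟨out, heq, hGo, hEo, hWo, -⟩ := ih lst' (i+1) hG' (by omega)
        refine ⟨out, heq, hGo, by rw [hEo, hE'], by omega, fun _ => by omega⟩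
      · simp only [hksf]
        simp only [Bool.not_eq_true] at hksf
        obtain ⟨out, heq, hGo, hEo, hWo, hstrict⟩ := ih lst (i+1) hG (by omega)
        refine ⟨out, heq, hGo, hEo, hWo, ?_⟩
        rintro ⟨j, hij, hjl, hkey⟩
        refine hstrict ⟨j, ?_, hjl, hkey⟩
        rcases Nat.lt_or_ge i j with h' | h'
        · omega
        · have : j = i := by omega
          subst this
          rw [hkey] at hksf
          simp at hksf
    · simp only [hil, if_false]
      refine ⟨lst, rfl, hG, rfl, le_refl _, ?_⟩
      rintro ⟨j, hij, hjl, -⟩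
      omega


-- the outer loop
theorem aloop_good (d0 : PySem.Dict String (List String)) (ref : String) (M innerF : Nat)
    (hc : d0.contains ref = true) (hk : d0.keys.head? = some ref) :
    ∀ fuel lst, GoodL d0 ref (M+1) lst → WtL d0 (M+1) lst + 1 ≤ fuel → WtL d0 (M+1) lst + 1 ≤ innerF →
    ∃ out, aLoop innerF fuel (d0.insert ref lst) = d0.insert ref out ∧
      EE d0 (M+1) out = EE d0 (M+1) lst ∧ (∀ e ∈ out, d0.contains e = false) := by
  intro fuel
  induction fuel with
  | zero =>
    intro lst hG hF hI
    exact absurd hF (by omega)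
  | succ fuel ih =>
    intro lst hG hF hI
    simp only [aLoop]
    rw [head_keys_insD d0 hc, hk]
    simp only []
    rw [getD_insD_self]
    have hany : (lst.any fun sf => (d0.insert ref lst).contains sf) = lst.any fun sf => d0.contains sf :=
      any_congr' (fun x _ => containsD d0 hc lst x)
    rw [hany]
    by_cases ha : (lst.any fun sf => d0.contains sf) = true
    · simp only [ha, if_true]
      obtain ⟨e, he, hke⟩ := List.any_eq_true.mp ha
      obtain ⟨j, hj, hje⟩ := List.mem_iff_getElem.mp he
      obtain ⟨out1, heq1, hG1, hE1, hW1, hstrict⟩ :=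
        pass_good d0 ref M hc innerF lst 0 hG (by omega)
      have hlt : WtL d0 (M+1) out1 < WtL d0 (M+1) lst := by
        refine hstrict ⟨j, Nat.zero_le _, hj, ?_⟩
        have : lst.getD j "" = lst[j] := by
          simp [List.getD_eq_getElem?_getD, List.getElem?_eq_getElem hj]
        rw [this, hje]
        exact hke
      rw [heq1]
      obtain ⟨out, heq, hE, hkf⟩ := ih out1 hG1 (by omega) (by omega)
      exact ⟨out, heq, by rw [hE, hE1], hkf⟩
    · simp only [ha]
      refine ⟨lst, rfl, rfl, ?_⟩
      intro e he
      have := List.any_eq_false.mp (Bool.not_eq_true _ ▸ ha) e he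
      simpa using this


theorem EE_keyfree (d : PySem.Dict String (List String)) (N : Nat) {l : List String}
    (h : ∀ e ∈ l, d.contains e = false) : EE d N l = l := by
  induction l with
  | nil => rfl
  | cons x t ih =>
    have hx := h x List.mem_cons_self
    simp only [EE, List.flatMap_cons]
    rw [exF_nonkey d N hx]
    simp only [EE] at ih
    rw [ih (fun e he => h e (List.mem_cons_of_mem _ he))]
    rfl


theorem expand_of_sup (d : PySem.Dict String (List String)) (m : Nat) :
    (∀ e s, supOpt d m e = some s → expandF d m e = s.filter (fun x => !d.contains x)) ∧
    (∀ l r, supListF d m l = some r → l.flatMap (expandF d m) = r.filter (fun x => !d.contains x)) := by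
  induction m with
  | zero =>
    constructor
    · intro e s hs
      by_cases hk : d.contains e
      · simp [supOpt, hk] at hs
      · simp only [Bool.not_eq_true] at hk
        rw [supOpt_nonkey d 0 hk] at hs
        cases hs
        simp [expandF, hk]
    · intro l r h
      induction l generalizing r with
      | nil => rw [supListF_nil] at h; cases h; rfl
      | cons x t ih =>
        rw [supListF_cons] at h
        cases hx : supOpt d 0 x with
        | none => rw [hx] at h; simp at h
        | some sx =>
          rw [hx] at h
          cases ht : supListF d 0 t with
          | none => rw [ht] at h; simp at h
          | some rt =>
            rw [ht] at h; cases h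
            have hkx : d.contains x = false := by
              by_contra hc
              simp only [Bool.not_eq_false] at hc
              simp [supOpt, hc] at hx
            rw [supOpt_nonkey d 0 hkx] at hx
            cases hx
            rw [List.flatMap_cons, List.filter_append, ih _ ht]
            simp [expandF, hkx]
  | succ m ihm =>
    have P : ∀ e s, supOpt d (m+1) e = some s →
        expandF d (m+1) e = s.filter (fun x => !d.contains x) := by
      intro e s hs
      by_cases hk : d.contains e
      · obtain ⟨r, hl, rfl⟩ := key_sup d hk hs
        simp only [expandF, hk, if_true]
        rw [ihm.2 _ _ hl]
        simp [hk]
      · simp only [Bool.not_eq_true] at hk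
        rw [supOpt_nonkey d (m+1) hk] at hs
        cases hs
        simp [expandF, hk]
    refine ⟨P, ?_⟩
    intro l r h
    induction l generalizing r with
    | nil => rw [supListF_nil] at h; cases h; rfl
    | cons x t ih =>
      rw [supListF_cons] at h
      cases hx : supOpt d (m+1) x with
      | none => rw [hx] at h; simp at h
      | some sx =>
        rw [hx] at h
        cases ht : supListF d (m+1) t with
        | none => rw [ht] at h; simp at h
        | some rt =>
          rw [ht] at h; cases h
          rw [List.flatMap_cons, List.filter_append, ih _ ht, P _ _ hx]


-- chains and reachability (for Pre_ → GoodL)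
theorem chain_tail {f : List (String × List String)} {x : String} {t : List String}
    (h : RChain f (x :: t)) : RChain f t := by
  cases t with
  | nil => trivial
  | cons b u => exact h.2.2


theorem chain_suffix {f : List (String × List String)} {u v : List String}
    (h : RChain f (u ++ v)) : RChain f v := by
  induction u with
  | nil => exact h
  | cons x u ih => exact ih (chain_tail h)


theorem chain_key {f : List (String × List String)} {c : List String} (h : RChain f c)
    {x : String} (hx : x ∈ c) : (PySem.Dict.mk f).contains x = true := by
  induction c with
  | nil => simp at hx
  | cons a t ih =>
    rcases List.mem_cons.mp hx with rfl | hx'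
    · cases t with
      | nil => exact h
      | cons b u => exact h.1
    · exact ih (chain_tail h) hx' 


theorem sup_none_chain (f : List (String × List String)) :
    ∀ m e, supOpt (PySem.Dict.mk f) m e = none → ∃ c, RChain f (e :: c) ∧ c.length = m := by
  intro m
  induction m with
  | zero =>
    intro e h
    have hk := supOpt_none_key (PySem.Dict.mk f) h
    exact ⟨[], hk, rfl⟩
  | succ m ih =>
    intro e h
    have hk := supOpt_none_key (PySem.Dict.mk f) h
    rw [supOpt_succ, hk] at h
    simp only [if_true] at h
    cases ht : supListF (PySem.Dict.mk f) m ((PySem.Dict.mk f).getD e []) with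
    | some r => rw [ht] at h; simp at h
    | none =>
      obtain ⟨x, hx, hxn⟩ := supListF_none _ ht
      obtain ⟨c, hc, hlen⟩ := ih x hxn
      have hkx := supOpt_none_key (PySem.Dict.mk f) hxn
      refine ⟨x :: c, ⟨hk, ?_, hc⟩, by simp [hlen]⟩
      simp only [refSuccs, List.mem_filter]
      exact ⟨hx, hkx⟩


theorem sup_mem_chain (f : List (String × List String)) :
    ∀ m e s, supOpt (PySem.Dict.mk f) m e = some s → ∀ x ∈ s, (PySem.Dict.mk f).contains x = true →
    ∃ c, RChain f (e :: c) ∧ x ∈ e :: c ∧ c.length ≤ m := by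
  intro m
  induction m with
  | zero =>
    intro e s h x hx hkx
    by_cases hk : (PySem.Dict.mk f).contains e
    · simp [supOpt, hk] at h
    · simp only [Bool.not_eq_true] at hk
      rw [supOpt_nonkey _ 0 hk] at h
      cases h
      simp only [List.mem_singleton] at hx
      subst hx
      rw [hk] at hkx; simp at hkx
  | succ m ih =>
    intro e s h x hx hkx
    by_cases hk : (PySem.Dict.mk f).contains e
    · obtain ⟨r, hl, rfl⟩ := key_sup _ hk h
      rcases List.mem_cons.mp hx with rfl | hx'
      · exact ⟨[], hk, List.mem_singleton_self _, by simp⟩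
      · -- x lies in the support of some child y
        have : ∃ y ∈ (PySem.Dict.mk f).getD e [], ∃ sy, supOpt (PySem.Dict.mk f) m y = some sy ∧ x ∈ sy := by
          clear ih hx h
          generalize hgl : (PySem.Dict.mk f).getD e [] = l at hl
          clear hgl
          induction l generalizing r with
          | nil => rw [supListF_nil] at hl; cases hl; simp at hx'
          | cons z t iht =>
            rw [supListF_cons] at hl
            cases hz : supOpt (PySem.Dict.mk f) m z with
            | none => rw [hz] at hl; simp at hl
            | some sz =>
              rw [hz] at hl
              cases ht : supListF (PySem.Dict.mk f) m t with
              | none => rw [ht] at hl; simp at hl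
              | some rt =>
                rw [ht] at hl; cases hl
                rcases List.mem_append.mp hx' with hxa | hxb
                · exact ⟨z, List.mem_cons_self, sz, hz, hxa⟩
                · obtain ⟨y, hy, sy, hsy, hxy⟩ := iht _ hxb ht
                  exact ⟨y, List.mem_cons_of_mem _ hy, sy, hsy, hxy⟩
        obtain ⟨y, hy, sy, hsy, hxy⟩ := this
        obtain ⟨c, hc, hxc, hlen⟩ := ih y sy hsy x hxy hkx
        have hky : (PySem.Dict.mk f).contains y = true := chain_key hc List.mem_cons_self
        refine ⟨y :: c, ⟨hk, ?_, hc⟩, List.mem_cons_of_mem _ hxc, by simp; omega⟩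
        simp only [refSuccs, List.mem_filter]
        exact ⟨hy, hky⟩
    · simp only [Bool.not_eq_true] at hk
      rw [supOpt_nonkey _ (m+1) hk] at h
      cases h
      simp only [List.mem_singleton] at hx
      subst hx
      rw [hk] at hkx; simp at hkx


theorem reach_self {f : List (String × List String)} (m : Nat) {S : List String} {x : String}
    (h : x ∈ S) : x ∈ reachN f m S := by
  induction m with
  | zero => exact h
  | succ m ih =>
    simp only [reachN, List.mem_dedup]
    exact List.mem_append_left _ ih


theorem reach_le {f : List (String × List String)} {m m' : Nat} (h : m ≤ m') {S : List String} {x : String}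
    (hx : x ∈ reachN f m S) : x ∈ reachN f m' S := by
  induction h with
  | refl => exact hx
  | step h ih =>
    simp only [reachN, List.mem_dedup]
    exact List.mem_append_left _ ih


theorem reach_step {f : List (String × List String)} {m : Nat} {S : List String} {x y : String}
    (hx : x ∈ reachN f m S) (hy : y ∈ refSuccs f x) : y ∈ reachN f (m+1) S := by
  simp only [reachN, List.mem_dedup]
  exact List.mem_append_right _ (List.mem_flatMap.mpr ⟨x, hx, hy⟩)


theorem chain_reach {f : List (String × List String)} :
    ∀ (t : List String) (x : String) (j M : Nat) (S : List String), RChain f (x :: t) →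
      x ∈ reachN f j S → j + t.length ≤ M → ∀ y ∈ x :: t, y ∈ reachN f M S := by
  intro t
  induction t with
  | nil =>
    intro x j M S hc hx hle y hy
    rcases List.mem_cons.mp hy with rfl | h'
    · exact reach_le (by omega) hx
    · simp at h'
  | cons b u ih =>
    intro x j M S hc hx hle y hy
    have hb : b ∈ reachN f (j+1) S := reach_step hx hc.2.1
    rcases List.mem_cons.mp hy with rfl | h'
    · exact reach_le (by omega) hx
    · exact ih b (j+1) M S hc.2.2 hb (by simp at hle ⊢; omega) y h' 


theorem nodup_length_le {l k : List String} (h : l.Nodup) (hs : l ⊆ k) : l.length ≤ k.length := by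
  calc l.length = l.toFinset.card := (List.toFinset_card_of_nodup h).symm
    _ ≤ k.toFinset.card := Finset.card_le_card (by intro x hx; simp only [List.mem_toFinset] at *; exact hs hx)
    _ ≤ k.length := k.toFinset_card_le


theorem exists_dup {l : List String} (h : ¬ l.Nodup) :
    ∃ a l1 l2 l3, l = l1 ++ a :: (l2 ++ a :: l3) := by
  induction l with
  | nil => simp at h
  | cons x t ih =>
    rw [List.nodup_cons] at h
    by_cases hx : x ∈ t
    · obtain ⟨s, u, rfl⟩ := List.append_of_mem hx
      exact ⟨x, [], s, u, by simp⟩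
    · have ht : ¬ t.Nodup := fun hn => h ⟨hx, hn⟩
      obtain ⟨a, l1, l2, l3, rfl⟩ := ih ht
      exact ⟨a, x :: l1, l2, l3, by simp⟩


theorem pre_goodL (ref : String) (cur : List String) (t : List (String × List String))
    (h : Pre_get_plain_ref_fields_py ((ref, cur) :: t)) :
    GoodL (PySem.Dict.mk ((ref, cur) :: t)) ref (((ref, cur) :: t).length + 1) cur := by
  obtain ⟨hnd, hacyc⟩ := h
  set f := (ref, cur) :: t with hf
  set d0 := PySem.Dict.mk f with hd0
  set n := f.length with hn
  have hc : d0.contains ref = true := by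
    rw [hd0, hf, PySem.Dict.contains_eq_isSome_get?, PySem.Dict.get?_mk_cons]; simp
  have hgd : d0.getD ref [] = cur := by
    rw [hd0, hf]; simp [PySem.Dict.getD, PySem.Dict.get?_mk_cons]
  have hstart : startKeys f = cur.filter (fun s => d0.contains s) := rfl
  have hrs : refSuccs f ref = startKeys f := by
    rw [hstart]
    show (d0.getD ref []).filter _ = _
    rw [hgd]
  intro e he
  by_cases hke : d0.contains e = true
  · have heS : e ∈ startKeys f := by
      rw [hstart]; exact List.mem_filter.mpr ⟨he, hke⟩
    cases hs : supOpt d0 (n+1) e with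
    | none =>
      obtain ⟨c, hch, hclen⟩ := sup_none_chain f (n+1) e hs
      have hsub : (e :: c) ⊆ f.map Prod.fst := by
        intro x hx
        have hkx := chain_key hch hx
        have := (PySem.Dict.contains_iff_mem_keys _ _).mp hkx
        rwa [PySem.Dict.keys_mk] at this
      have hnodup : ¬ (e :: c).Nodup := by
        intro hnod
        have := nodup_length_le hnod hsub
        simp only [List.length_cons, hclen, List.length_map] at this
        omega
      obtain ⟨a, l1, l2, l3, hdecomp⟩ := exists_dup hnodup
      have hlen2 : l1.length + 1 + l2.length + 1 + l3.length = n + 2 := by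
        have := congrArg List.length hdecomp
        simp at this
        omega
      have hreach := chain_reach c e 0 (n+2) (startKeys f) hch (reach_self 0 heS)
        (by simp [hclen])
      have haR : a ∈ reachN f (n+2) (startKeys f) :=
        hreach a (by rw [hdecomp]; simp)
      have hsuf : RChain f (a :: (l2 ++ a :: l3)) :=
        chain_suffix (u := l1) (v := a :: (l2 ++ a :: l3)) (by rw [← hdecomp]; exact hch)
      have hacycle : a ∈ reachN f (n+2) (refSuccs f a) := by
        cases l2 with
        | nil =>
          have hmem : a ∈ refSuccs f a := hsuf.2.1
          exact reach_self _ hmem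
        | cons b l2' =>
          have hb : b ∈ refSuccs f a := hsuf.2.1
          have hch2 : RChain f (b :: (l2' ++ a :: l3)) := hsuf.2.2
          refine chain_reach _ b 0 (n+2) (refSuccs f a) hch2 (reach_self 0 hb)
            (by simp at hlen2 ⊢; omega) a (by simp)
      exact absurd hacycle (hacyc a haR)
    | some s =>
      refine ⟨s, hs, fun hrefs => ?_⟩
      obtain ⟨c, hch, hmem, hclen⟩ := sup_mem_chain f (n+1) e s hs ref hrefs hc
      have hrefR : ref ∈ reachN f (n+2) (startKeys f) :=
        chain_reach c e 0 (n+2) (startKeys f) hch (reach_self 0 heS) (by omega) ref hmem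
      have := hacyc ref hrefR
      rw [hrs] at this
      exact this hrefR
  · simp only [Bool.not_eq_true] at hke
    refine ⟨[e], supOpt_nonkey d0 (n+1) hke, ?_⟩
    simp only [List.mem_singleton]
    intro hre
    rw [hre] at hc
    rw [hc] at hke
    exact Bool.noConfusion hke


-- ===== VERDICT (by name: the statement is the Claim_ definition above) =====
theorem get_plain_ref_fields_py_spec : Claim_equal_get_plain_ref_fields_py := by
  unfold Claim_equal_get_plain_ref_fields_py
  intro fof_refchar hDom hPre
  unfold Spec_get_plain_ref_fields_py
  cases fof_refchar with
  | nil => rfl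
  | cons p t =>
    obtain ⟨ref, cur⟩ := p
    have hc : (PySem.Dict.mk ((ref, cur) :: t)).contains ref = true := by
      rw [PySem.Dict.contains_eq_isSome_get?, PySem.Dict.get?_mk_cons]; simp
    have hk : (PySem.Dict.mk ((ref, cur) :: t)).keys.head? = some ref := by
      simp [PySem.Dict.keys_mk]
    have hgd : (PySem.Dict.mk ((ref, cur) :: t)).getD ref [] = cur := by
      simp [PySem.Dict.getD, PySem.Dict.get?_mk_cons]
    set d0 := PySem.Dict.mk ((ref, cur) :: t) with hd0
    set M := ((ref, cur) :: t).length with hM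
    have hG : GoodL d0 ref (M+1) cur := pre_goodL ref cur t hPre
    have hins : d0.insert ref cur = d0 := insert_first_self ref cur t hPre.1
    have hbig : bigFuel d0 = WtL d0 (M+1) cur + 1 := by
      simp only [bigFuel, hk, hgd]
      rfl
    obtain ⟨out, heq, hE, hkf⟩ :=
      aloop_good d0 ref M (bigFuel d0) hc hk (bigFuel d0) cur hG (by rw [hbig]) (by rw [hbig])
    have hA : get_plain_ref_fields_py ((ref, cur) :: t) = (d0.insert ref (EE d0 (M+1) cur)).items := by
      show (aLoop (bigFuel d0) (bigFuel d0) d0).items = _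
      conv_lhs => rw [show aLoop (bigFuel d0) (bigFuel d0) d0
        = aLoop (bigFuel d0) (bigFuel d0) (d0.insert ref cur) by rw [hins]]
      rw [heq]
      have hout : out = EE d0 (M+1) cur := by
        rw [← hE]; exact (EE_keyfree d0 (M+1) hkf).symm
      rw [hout]
    rw [hA]
    show _ = get_plain_ref_fields_py_alt ((ref, cur) :: t)
    simp only [get_plain_ref_fields_py_alt]
    rw [← hd0, hk]
    simp only [hgd]
    rw [← hM]
    by_cases hany : (cur.any fun sf => d0.contains sf) = true
    · simp only [hany, if_true]
      have hflat : cur.flatMap (expandF d0 (M+1)) = EE d0 (M+1) cur := by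
        refine List.flatMap_congr ?_
        intro e he
        obtain ⟨se, hse, -⟩ := hG e he
        rw [(expand_of_sup d0 (M+1)).1 e se hse]
        simp [exF, hse]
      rw [hflat]
    · simp only [Bool.not_eq_true] at hany
      simp only [hany, Bool.false_eq_true, if_false]
      have hkfree : ∀ e ∈ cur, d0.contains e = false := by
        intro e he
        simpa using List.any_eq_false.mp hany e he
      rw [EE_keyfree d0 (M+1) hkfree, hins]
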